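-- pv_equiv track=rewrite | github.com/Devlowave-Org/RNJAPI | scraper.py | collect_department
-- ===== SOURCE A (Python) =====
-- def collect_department(string):
--     department = ""
--     for char in reversed(string):
--         if not char.isspace():
--             department += char
--         else:
--             break
--     department = "".join(reversed(department)).strip()
--     for char in "()":
--         department = department.replace(char, "").strip()
--     return department
-- ===== SOURCE B (Python) =====
-- def collect_department(string):
--     # single forward pass: remember the index of the last whitespace character
--     idx = -1
--     for i, ch in enumerate(string):
--         if ch.isspace():
--             idx = i
--     # everything after it, with parentheses dropped in one filtering pass
--     return "".join(ch for ch in string[idx + 1:] if ch not in "()")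
-- ===== Notes on version B (the rewrite author's own statement) =====
-- stated objective: simpler
-- what changed: Replaces A's reverse-accumulate-reverse loop plus a strip/replace/strip cleanup chain by one forward scan remembering the last whitespace index, then a single filtering pass over the suffix that drops parentheses.
import Mathlib
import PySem

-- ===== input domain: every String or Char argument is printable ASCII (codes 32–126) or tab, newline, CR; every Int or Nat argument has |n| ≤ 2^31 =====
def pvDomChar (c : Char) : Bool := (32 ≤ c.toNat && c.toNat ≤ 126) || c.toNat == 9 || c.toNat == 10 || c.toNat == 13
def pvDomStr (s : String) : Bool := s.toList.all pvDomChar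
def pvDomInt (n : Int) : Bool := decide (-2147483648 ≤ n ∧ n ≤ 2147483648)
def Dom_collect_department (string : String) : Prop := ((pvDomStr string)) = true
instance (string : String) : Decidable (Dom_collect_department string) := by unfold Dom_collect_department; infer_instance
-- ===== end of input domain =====

-- B replaces A's reversed-accumulate-reverse pass by one forward scan for the last
-- whitespace index and a single filtering pass over the suffix (objective: simpler).

-- ===== PORT A =====
-- the `for char in reversed(string): … else break` loop
def cdLoop : List Char → List Char → List Char
  | [], dep => dep
  | c :: rest, dep =>
      if !(PySem.Chars.isspace c) then cdLoop rest (dep ++ [c]) else dep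

def collect_department (string : String) : String :=
  let department := cdLoop string.toList.reverse []
  let department := PySem.Chars.strip department.reverse
  let department := "()".toList.foldl
    (fun d ch => PySem.Chars.strip (PySem.Chars.replace d [ch] [])) department
  String.mk department

-- ===== PORT B =====
def collect_department_alt (string : String) : String :=
  let cs := string.toList
  let idx := (PySem.List.enumerate cs).foldl
    (fun idx p => if PySem.Chars.isspace p.2 then p.1 else idx) (-1 : Int)
  String.mk ((PySem.List.slice cs (some (idx + 1)) none).filter
      (fun ch => !(ch == '(' || ch == ')')))

-- ===== PRECONDITION & SPEC =====
def Spec_collect_department (string : String) (out : String) : Prop := out = collect_department_alt string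
instance (string : String) (out : String) : Decidable (Spec_collect_department string out) := by unfold Spec_collect_department; infer_instance

-- ===== CLAIM (what is proved, stated in full; the proofs are below) =====
def Claim_equal_collect_department : Prop := ∀ (string : String), Dom_collect_department string → Spec_collect_department string (collect_department string)

-- ===== LEMMAS AND PROOFS =====

theorem cdLoop_eq (l dep : List Char) :
    cdLoop l dep = dep ++ l.takeWhile (fun c => !PySem.Chars.isspace c) := by
  induction l generalizing dep with
  | nil => simp [cdLoop]
  | cons c rest ih =>
      by_cases h : PySem.Chars.isspace c
      · simp [cdLoop, h]
      · simp [cdLoop, h, ih]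

theorem dropWhile_isspace_of_none (l : List Char)
    (h : ∀ c ∈ l, PySem.Chars.isspace c = false) :
    List.dropWhile PySem.Chars.isspace l = l := by
  cases l with
  | nil => rfl
  | cons c t => simp [h c (by simp)]

theorem strip_of_none (l : List Char)
    (h : ∀ c ∈ l, PySem.Chars.isspace c = false) :
    PySem.Chars.strip l = l := by
  unfold PySem.Chars.strip PySem.Chars.lstrip PySem.Chars.rstrip
  rw [dropWhile_isspace_of_none l h,
      dropWhile_isspace_of_none l.reverse (by intro c hc; exact h c (by simpa using hc)),
      List.reverse_reverse]

theorem replace_go_filter (c : Char) (l : List Char) (fuel : Nat) (acc : List Char)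
    (hf : l.length ≤ fuel) :
    PySem.Chars.replace.go [c] [] fuel l acc
      = acc.reverse ++ l.filter (fun x => !(x == c)) := by
  induction l generalizing fuel acc with
  | nil => cases fuel <;> simp [PySem.Chars.replace.go]
  | cons d t ih =>
      cases fuel with
      | zero => simp at hf
      | succ fuel =>
          simp only [PySem.Chars.replace.go]
          by_cases h : d = c
          · subst h
            have hpre : [d].isPrefixOf (d :: t) = true := by simp [List.isPrefixOf]
            rw [if_pos hpre]
            have hdrop : List.drop [d].length (d :: t) = t := rfl
            rw [hdrop, ih fuel ([].reverse ++ acc) (by simpa using Nat.le_of_succ_le_succ hf)]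
            simp
          · have hpre : [c].isPrefixOf (d :: t) = false := by
              simp [List.isPrefixOf]; exact fun hdc => (h hdc.symm).elim
            rw [if_neg (by simp [hpre])]
            rw [ih fuel (d :: acc) (by simpa using Nat.le_of_succ_le_succ hf)]
            simp [h]

theorem replace_filter (l : List Char) (c : Char) :
    PySem.Chars.replace l [c] [] = l.filter (fun x => !(x == c)) := by
  unfold PySem.Chars.replace
  simp only [List.isEmpty_cons, Bool.false_eq_true, if_false]
  rw [replace_go_filter c l l.length [] le_rfl]
  simp

-- proof-only abbreviation for B's last-whitespace index
def lastWs (cs : List Char) : Int :=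
  (PySem.List.enumerate cs).foldl
    (fun idx p => if PySem.Chars.isspace p.2 then p.1 else idx) (-1 : Int)

-- the last-whitespace index computed by B characterises the suffix A accumulates
theorem idx_spec (cs : List Char) :
    -1 ≤ lastWs cs ∧ lastWs cs + 1 ≤ (cs.length : Int) ∧
      cs.drop (lastWs cs + 1).toNat
        = (cs.reverse.takeWhile (fun c => !PySem.Chars.isspace c)).reverse := by
  unfold lastWs
  induction cs using List.reverseRecOn with
  | nil => simp [PySem.List.enumerate]
  | append_singleton cs c ih =>
      obtain ⟨h1, h2, h3⟩ := ih
      rw [PySem.List.enumerate_append, List.foldl_append]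
      simp only [PySem.List.enumerate_cons, PySem.List.enumerate_nil,
        List.foldl_cons, List.foldl_nil]
      by_cases hc : PySem.Chars.isspace c = true
      · rw [if_pos hc]
        refine ⟨by omega, by simp, ?_⟩
        simp only [List.reverse_append, List.reverse_cons, List.reverse_nil,
          List.nil_append, List.singleton_append, List.takeWhile_cons, hc,
          Bool.not_true, Bool.false_eq_true, if_false, List.reverse_nil]
        rw [List.drop_eq_nil_iff]
        simp
      · rw [if_neg hc]
        refine ⟨h1, by simp; omega, ?_⟩
        rw [List.drop_append_of_le_length (by omega)]
        have hcf : PySem.Chars.isspace c = false := by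
          cases hcb : PySem.Chars.isspace c
          · rfl
          · exact absurd hcb hc
        simp [hcf, h3]

theorem mem_suffix_not_space (cs : List Char) (c : Char)
    (hc : c ∈ (cs.reverse.takeWhile (fun c => !PySem.Chars.isspace c)).reverse) :
    PySem.Chars.isspace c = false := by
  rw [List.mem_reverse] at hc
  simpa using List.mem_takeWhile_imp hc

-- ===== VERDICT (by name: the statement is the Claim_ definition above) =====
theorem collect_department_spec : Claim_equal_collect_department := by
  intro s _
  unfold Spec_collect_department collect_department collect_department_alt
  dsimp only
  obtain ⟨h1, h2, h3⟩ := idx_spec s.toList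
  rw [show (PySem.List.enumerate s.toList).foldl
    (fun idx p => if PySem.Chars.isspace p.2 then p.1 else idx) (-1 : Int) = lastWs s.toList from rfl]
  set t := (s.toList.reverse.takeWhile (fun c => !PySem.Chars.isspace c)).reverse with ht
  have hns : ∀ c ∈ t, PySem.Chars.isspace c = false := fun c hc => mem_suffix_not_space _ c hc
  have hA : cdLoop s.toList.reverse [] = t.reverse := by
    rw [cdLoop_eq]; simp [ht]
  rw [hA, List.reverse_reverse, strip_of_none t hns]
  have hfold : "()".toList = ['(', ')'] := rfl
  rw [hfold]
  simp only [List.foldl_cons, List.foldl_nil]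
  rw [replace_filter t '(',
      strip_of_none _ (fun c hc => hns c (List.mem_of_mem_filter hc)),
      replace_filter _ ')',
      strip_of_none _ (fun c hc => hns c (List.mem_of_mem_filter (List.mem_of_mem_filter hc)))]
  rw [PySem.List.slice_from s.toList (by omega : (0:Int) ≤ lastWs s.toList + 1), h3]
  rw [List.filter_filter]
  congr 1
  apply List.filter_congr
  intro c _
  cases hcp : (c == '(') <;> cases hcq : (c == ')') <;> simp_all
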